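-- pv_equiv track=rewrite | github.com/sueszli/vector-database-benchmark | dataset/python-mutated/switch_pairs.py | second_switch_pairs
-- ===== SOURCE A (Python) =====
-- import collections
--
-- def second_switch_pairs(stack):
--     if False:
--         i = 10
--         return i + 15
--     q = collections.deque()
--     for i in range(len(stack)):
--         q.append(stack.pop())
--     for i in range(len(q)):
--         stack.append(q.pop())
--     for i in range(len(stack)):
--         q.append(stack.pop())
--     for i in range(len(q)):
--         if len(q) == 0:
--             break
--         first = q.pop()
--         if len(q) == 0:
--             stack.append(first)
--             break
--         second = q.pop()
--         stack.append(second)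
--         stack.append(first)
--     return stack
-- ===== SOURCE B (Python) =====
-- def second_switch_pairs(stack):
--     # Simpler: in-place pairwise swap by step-2 index loop; no deque, no pop/append transfers.
--     for i in range(0, len(stack) - 1, 2):
--         stack[i], stack[i + 1] = stack[i + 1], stack[i]
--     return stack
-- ===== Notes on version B (the rewrite author's own statement) =====
-- stated objective: simpler
-- what changed: Replaces the deque and its three pop/append transfer loops plus the pairing pop loop with a single in-place step-2 index loop that swaps stack[i] and stack[i+1].
import Mathlib
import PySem

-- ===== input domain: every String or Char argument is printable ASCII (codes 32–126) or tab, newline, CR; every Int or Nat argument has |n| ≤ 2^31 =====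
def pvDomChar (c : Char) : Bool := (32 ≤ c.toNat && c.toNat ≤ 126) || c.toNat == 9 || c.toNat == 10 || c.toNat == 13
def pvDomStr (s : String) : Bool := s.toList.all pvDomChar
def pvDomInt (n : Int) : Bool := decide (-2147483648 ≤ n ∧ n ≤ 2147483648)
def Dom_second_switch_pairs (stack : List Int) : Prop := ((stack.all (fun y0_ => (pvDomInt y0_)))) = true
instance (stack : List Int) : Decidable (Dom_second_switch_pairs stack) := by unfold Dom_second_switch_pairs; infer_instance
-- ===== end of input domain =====

-- B replaces A's deque transfer loops by a direct recursive pairwise swap (simpler, same O(n));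
-- both Pythons mutate `stack` in place and return it — the equivalence proved is about the return value.


-- ===== PORT A =====
-- `for i in range(n): dst.append(src.pop())` — pops from src's right end, appends to dst's right end.
-- The `none` branch is Python's IndexError on popping an empty list; the fuel always equals the
-- source length, so it is never reached.
def pvTransfer : Nat → List Int → List Int → List Int × List Int
  | 0, src, dst => (src, dst)
  | n + 1, src, dst =>
    match PySem.List.pop? src with
    | none => (src, dst)
    | some (x, src') => pvTransfer n src' (dst ++ [x])

-- the final `for i in range(len(q))` loop with its two break conditions
def pvPairLoop : Nat → List Int → List Int → List Int
  | 0, _, stack => stack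
  | n + 1, q, stack =>
    if q.length = 0 then stack
    else
      match PySem.List.pop? q with
      | none => stack
      | some (first, q1) =>
        if q1.length = 0 then stack ++ [first]
        else
          match PySem.List.pop? q1 with
          | none => stack ++ [first]
          | some (second, q2) => pvPairLoop n q2 (stack ++ [second, first])

def second_switch_pairs (stack : List Int) : List Int :=
  -- the dead `if False:` block of A is omitted: it never executes
  let r1 := pvTransfer stack.length stack []        -- stack → q
  let r2 := pvTransfer r1.2.length r1.2 r1.1        -- q → stack
  let r3 := pvTransfer r2.2.length r2.2 r2.1        -- stack → q
  pvPairLoop r3.2.length r3.2 r3.1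

-- ===== PORT B =====
-- `stack[i], stack[i+1] = stack[i+1], stack[i]` — both indices are < len(stack) for every i the
-- range produces, so Python never raises and pyGetD's default is never read.
def pvSwapStep (st : List Int) (i : Int) : List Int :=
  let x := PySem.List.pyGetD st i 0
  let y := PySem.List.pyGetD st (i + 1) 0
  (st.set i.toNat y).set (i + 1).toNat x

def second_switch_pairs_alt (stack : List Int) : List Int :=
  (PySem.List.pyRange 0 ((stack.length : Int) - 1) 2).foldl pvSwapStep stack

-- ===== PRECONDITION & SPEC =====
def Spec_second_switch_pairs (stack : List Int) (out : List Int) : Prop := out = second_switch_pairs_alt stack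
instance (stack : List Int) (out : List Int) : Decidable (Spec_second_switch_pairs stack out) := by unfold Spec_second_switch_pairs; infer_instance

-- ===== CLAIM (what is proved, stated in full; the proofs are below) =====
def Claim_equal_second_switch_pairs : Prop := ∀ (stack : List Int), Dom_second_switch_pairs stack → Spec_second_switch_pairs stack (second_switch_pairs stack)

-- ===== LEMMAS AND PROOFS =====

-- common intermediate form: the pairwise-swapped list, used only by the proofs below
def pvSwapped : List Int → List Int
  | a :: b :: rest => b :: a :: pvSwapped rest
  | xs => xs

theorem pyRange_two_nil (a b : Int) (h : b ≤ a) : PySem.List.pyRange a b 2 = [] := by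
  rw [PySem.List.pyRange_of_pos _ _ (by norm_num), if_neg (by omega)]
  simp

theorem pyRange_two_cons (a b : Int) (h : a < b) :
    PySem.List.pyRange a b 2 = a :: PySem.List.pyRange (a + 2) b 2 := by
  rw [PySem.List.pyRange_of_pos _ _ (by norm_num), PySem.List.pyRange_of_pos _ _ (by norm_num)]
  by_cases h2 : a + 2 < b
  · rw [if_pos h, if_pos h2]
    have hN : ((b - a + 2 - 1) / 2).toNat = ((b - (a + 2) + 2 - 1) / 2).toNat + 1 := by omega
    rw [hN, List.range_succ_eq_map, List.map_cons, List.map_map]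
    refine congrArg₂ _ (by ring) (List.map_congr_left fun k _ => ?_)
    simp only [Function.comp_apply]
    push_cast
    ring
  · rw [if_pos h, if_neg h2]
    have hN : ((b - a + 2 - 1) / 2).toNat = 1 := by omega
    simp [hN]

-- a full transfer empties the source and appends its reverse to the destination
theorem pvTransfer_full (xs : List Int) : ∀ acc, pvTransfer xs.length xs acc = ([], acc ++ xs.reverse) := by
  induction xs using List.reverseRecOn with
  | nil => intro acc; simp [pvTransfer]
  | append_singleton ys l ih =>
    intro acc
    simp only [List.length_append, List.length_cons, List.length_nil]
    simp only [pvTransfer, PySem.List.pop?_last]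
    rw [ih (acc ++ [l])]
    simp

-- fuel-insensitive form: n = xs.length lets `simp` discharge the length side condition
theorem pvTransfer_full' {n : Nat} {xs acc : List Int} (h : n = xs.length) :
    pvTransfer n xs acc = ([], acc ++ xs.reverse) := by subst h; exact pvTransfer_full xs acc

theorem pvPairLoop_swapped (xs : List Int) : ∀ fuel stack, xs.length ≤ 2 * fuel →
    pvPairLoop fuel xs.reverse stack = stack ++ pvSwapped xs := by
  induction xs using pvSwapped.induct with
  | case2 xs hshape =>
    intro fuel stack h
    rcases xs with _ | ⟨a, _ | ⟨b, rest⟩⟩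
    · cases fuel <;> simp [pvPairLoop, pvSwapped]
    · match fuel, h with
      | f + 1, _ =>
        simp only [pvPairLoop, List.reverse_cons, List.reverse_nil, List.nil_append]
        rw [if_neg (by simp), show ([a] : List Int) = [] ++ [a] from rfl, PySem.List.pop?_last]
        simp [pvSwapped]
    · exact (hshape a b rest rfl).elim
  | case1 a b rest ih =>
    intro fuel stack h
    match fuel, h with
    | f + 1, h =>
      have hr : rest.length ≤ 2 * f := by simp [List.length_cons] at h; omega
      simp only [pvPairLoop]
      have h1 : (a :: b :: rest).reverse = (rest.reverse ++ [b]) ++ [a] := by simp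
      rw [h1, if_neg (by simp), PySem.List.pop?_last]
      simp only []
      rw [if_neg (by simp), PySem.List.pop?_last]
      simp only []
      rw [ih f (stack ++ [b, a]) hr]
      simp [pvSwapped]

-- B's index loop, run on pre ++ xs from index pre.length, swaps xs pairwise in place
theorem pvLoop_swaps (xs : List Int) : ∀ pre : List Int,
    (PySem.List.pyRange (pre.length : Int) ((pre.length : Int) + (xs.length : Int) - 1) 2).foldl
      pvSwapStep (pre ++ xs) = pre ++ pvSwapped xs := by
  induction xs using pvSwapped.induct with
  | case2 xs hshape =>
    rcases xs with _ | ⟨a, _ | ⟨b, rest⟩⟩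
    · intro pre; rw [pyRange_two_nil _ _ (by push_cast [List.length_nil]; omega)]; simp [pvSwapped]
    · intro pre; rw [pyRange_two_nil _ _ (by push_cast [List.length_cons, List.length_nil]; omega)]; simp [pvSwapped]
    · exact (hshape a b rest rfl).elim
  | case1 a b rest ih =>
    intro pre
    rw [pyRange_two_cons _ _ (by push_cast [List.length_cons]; omega), List.foldl_cons]
    have hstep : pvSwapStep (pre ++ a :: b :: rest) (pre.length : Int) =
        (pre ++ [b, a]) ++ rest := by
      unfold pvSwapStep
      have hx : PySem.List.pyGetD (pre ++ a :: b :: rest) (pre.length : Int) 0 = a := by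
        rw [PySem.List.pyGetD_natCast, List.getD_append_right _ _ _ _ (le_refl _)]
        simp
      have hy : PySem.List.pyGetD (pre ++ a :: b :: rest) ((pre.length : Int) + 1) 0 = b := by
        rw [show ((pre.length : Int) + 1) = ((pre.length + 1 : Nat) : Int) by push_cast; ring,
          PySem.List.pyGetD_natCast, List.getD_append_right _ _ _ _ (by omega)]
        simp
      have ht1 : ((pre.length : Int)).toNat = pre.length := by omega
      have ht2 : ((pre.length : Int) + 1).toNat = pre.length + 1 := by omega
      simp only [hx, hy, ht1, ht2]
      rw [List.set_append, if_neg (by omega)]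
      simp only [Nat.sub_self, List.set_cons_zero]
      rw [List.set_append, if_neg (by omega)]
      have h1 : pre.length + 1 - pre.length = 1 := by omega
      rw [h1]
      simp
    rw [hstep]
    have hb : (pre.length : Int) + ((a :: b :: rest).length : Int) - 1 =
        ((pre ++ [b, a]).length : Int) + (rest.length : Int) - 1 := by push_cast [List.length_append, List.length_cons, List.length_nil]; ring
    have ha : (pre.length : Int) + 2 = ((pre ++ [b, a]).length : Int) := by
      push_cast [List.length_append, List.length_cons, List.length_nil]; ring
    rw [hb, ha, ih (pre ++ [b, a])]
    simp [pvSwapped]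

theorem alt_eq_swapped (stack : List Int) : second_switch_pairs_alt stack = pvSwapped stack := by
  have h := pvLoop_swaps stack []
  unfold second_switch_pairs_alt
  simpa using h

-- ===== VERDICT (by name: the statement is the Claim_ definition above) =====
theorem second_switch_pairs_spec : Claim_equal_second_switch_pairs := by
  intro stack _
  unfold Spec_second_switch_pairs second_switch_pairs
  rw [alt_eq_swapped]
  simp [pvTransfer_full']
  have := pvPairLoop_swapped stack stack.length [] (by omega)
  simpa using this
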